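-- pv_equiv track=rewrite | github.com/nsmith0310/RepoDepot | other_projects/basic_algorithms_programming_challenges/python3/LeetCode/lc1300_binary_search_mutated_array.py | findBestValue
-- ===== SOURCE A (Python) =====
-- from typing import List
--
-- def findBestValue(arr: List[int], target: int) -> int:
--     def s(val):
--         t = 0
--         for x in arr:
--             if x<=val:
--                 t+=x
--             else:
--                 t+=val
--         return t
--
--     l = 1
--     h = max(arr)
--     m = (l+h)//2
--     while l<=h:
--         val = s(m)
--         if val-target<0:
--             l = m+1
--             m = (l+h)//2
--         elif val-target>0:
--             h = m-1
--             m = (l+h)//2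
--         else:
--             return m
--     v1 = s(l)
--     v2 = s(h)
--
--     if abs(v1-target)<abs(v2-target):
--         return l
--     elif abs(v1-target)>abs(v2-target):
--         return h
--     else:
--         return min(l,h)
-- ===== SOURCE B (Python) =====
-- def findBestValue(arr, target):
--     a = sorted(arr)
--     n = len(a)
--     prefix = [0]
--     for x in a:
--         prefix.append(prefix[-1] + x)
--
--     def sval(v):
--         # index of first element > v (hand-written bisect_right)
--         lo, hi = 0, n
--         while lo < hi:
--             mid = (lo + hi) // 2
--             if a[mid] <= v:
--                 lo = mid + 1
--             else:
--                 hi = mid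
--         return prefix[lo] + v * (n - lo)
--
--     # smallest l in [1, a[-1] + 1] with sval(l) >= target
--     lo, hi = 1, a[-1]
--     while lo <= hi:
--         mid = (lo + hi) // 2
--         if sval(mid) >= target:
--             hi = mid - 1
--         else:
--             lo = mid + 1
--     l, h = lo, lo - 1
--     v1, v2 = sval(l), sval(h)
--     if abs(v1 - target) < abs(v2 - target):
--         return l
--     return h
-- ===== Notes on version B (the rewrite author's own statement) =====
-- stated objective: faster
-- what changed: Instead of re-scanning the whole array (O(n)) at every binary-search step, B sorts the array once, builds prefix sums, evaluates s(val) in O(log n) by a hand-written bisect, and finds the boundary with a plain lower-bound search (no early exit), then compares the two boundary values.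
-- outside the precondition, e.g. on findBestValue([-5], -10): A returns -5, B returns 0
import Mathlib
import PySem

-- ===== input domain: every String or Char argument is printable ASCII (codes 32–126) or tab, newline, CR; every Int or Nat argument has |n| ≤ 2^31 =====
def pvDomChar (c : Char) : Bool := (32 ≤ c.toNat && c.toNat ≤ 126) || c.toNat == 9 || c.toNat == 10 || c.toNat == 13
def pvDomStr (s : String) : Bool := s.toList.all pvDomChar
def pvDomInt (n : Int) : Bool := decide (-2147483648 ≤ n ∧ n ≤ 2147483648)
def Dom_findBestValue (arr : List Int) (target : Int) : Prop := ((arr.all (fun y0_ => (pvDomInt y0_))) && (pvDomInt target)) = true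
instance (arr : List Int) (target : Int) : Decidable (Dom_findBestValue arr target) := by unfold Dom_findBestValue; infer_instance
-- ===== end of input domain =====

-- B replaces A's O(n) rescans per binary-search step by sort + prefix sums + O(log n) bisect evaluation (objective: faster).

-- ===== PORT A =====
-- A's inner helper s(val)
def sA (arr : List Int) (val : Int) : Int :=
  arr.foldl (fun t x => if x ≤ val then t + x else t + val) 0

-- A's while loop.  A recomputes m = (l+h)//2 from the freshly updated l, h inside each
-- branch (and initialises it the same way), so at every use m equals (l+h)//2 of the
-- current l, h; the port computes it at the loop head, which is the same value.
def loopA (arr : List Int) (target l h : Int) : Int :=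
  if hlh : l ≤ h then
    let m := PySem.Int.floordiv (l + h) 2
    let val := sA arr m
    if val - target < 0 then loopA arr target (m + 1) h
    else if val - target > 0 then loopA arr target l (m - 1)
    else m
  else
    let v1 := sA arr l
    let v2 := sA arr h
    if |v1 - target| < |v2 - target| then l
    else if |v1 - target| > |v2 - target| then h
    else min l h
termination_by (h + 1 - l).toNat
decreasing_by
  all_goals
    have hm := PySem.Int.floordiv_two_mid_bounds (lo := l) (hi := h) hlh
    omega

def findBestValue (arr : List Int) (target : Int) : Int :=
  match PySem.List.max? arr (fun y => y) with
  | some M => loopA arr target 1 M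
  | none => 0  -- unreachable: Python's max([]) raises ValueError (excluded by Pre_)

-- ===== PORT B =====
-- B's hand-written bisect_right loop (index of first element > v in the sorted a)
def bisR (a : List Int) (v lo hi : Int) : Int :=
  if hlh : lo < hi then
    let mid := PySem.Int.floordiv (lo + hi) 2
    if PySem.List.pyGetD a mid 0 ≤ v then bisR a v (mid + 1) hi
    else bisR a v lo mid
  else lo
termination_by (hi - lo).toNat
decreasing_by
  all_goals
    have hm := PySem.Int.floordiv_two_mid_bounds (lo := lo) (hi := hi) (le_of_lt hlh)
    have : PySem.Int.floordiv (lo + hi) 2 < hi := by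
      rw [PySem.Int.floordiv_eq_ediv_of_pos (by omega)]; omega
    omega

-- B's sval(v) = prefix[i] + v * (n - i)
def svalB (a prefixL : List Int) (n v : Int) : Int :=
  let i := bisR a v 0 n
  PySem.List.pyGetD prefixL i 0 + v * (n - i)

-- B's lower-bound binary search over values
def loopB (a prefixL : List Int) (n target lo hi : Int) : Int :=
  if hlh : lo ≤ hi then
    let mid := PySem.Int.floordiv (lo + hi) 2
    if svalB a prefixL n mid ≥ target then loopB a prefixL n target lo (mid - 1)
    else loopB a prefixL n target (mid + 1) hi
  else lo
termination_by (hi + 1 - lo).toNat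
decreasing_by
  all_goals
    have hm := PySem.Int.floordiv_two_mid_bounds (lo := lo) (hi := hi) hlh
    omega

def findBestValue_alt (arr : List Int) (target : Int) : Int :=
  let a := PySem.List.sorted arr (fun y => y) false
  let n : Int := a.length
  let prefixL := a.foldl (fun p x => p ++ [PySem.List.pyGetD p (-1) 0 + x]) [0]
  let lo := loopB a prefixL n target 1 (PySem.List.pyGetD a (-1) 0)
  let l := lo
  let h := lo - 1
  let v1 := svalB a prefixL n l
  let v2 := svalB a prefixL n h
  if |v1 - target| < |v2 - target| then l else h

-- ===== PRECONDITION & SPEC =====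
-- Pre_ excludes the empty list (A's max([]) raises ValueError) and lists whose elements are
-- all negative, where A's final comparison runs on the inverted interval [1, max] with
-- max < 0 — an artefact of an input outside the problem's constraints (arr[i] >= 1).
def Pre_findBestValue (arr : List Int) (target : Int) : Prop :=
  arr.any (fun x => 0 ≤ x) = true
instance (arr : List Int) (target : Int) : Decidable (Pre_findBestValue arr target) := by
  unfold Pre_findBestValue; infer_instance

def pvWitness_findBestValue : List Int × Int := ([4, 9, 3], 10)

def Spec_findBestValue (arr : List Int) (target : Int) (out : Int) : Prop :=
  out = findBestValue_alt arr target
instance (arr : List Int) (target : Int) (out : Int) : Decidable (Spec_findBestValue arr target out) := by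
  unfold Spec_findBestValue; infer_instance

-- ===== CLAIM (what is proved, stated in full; the proofs are below) =====
def Claim_equal_findBestValue : Prop := ∀ (arr : List Int) (target : Int), Dom_findBestValue arr target → Pre_findBestValue arr target → Spec_findBestValue arr target (findBestValue arr target)

-- ===== LEMMAS AND PROOFS =====

theorem findBestValue_witness_ok :
    Dom_findBestValue pvWitness_findBestValue.1 pvWitness_findBestValue.2 ∧
    Pre_findBestValue pvWitness_findBestValue.1 pvWitness_findBestValue.2 := by decide

-- s(val) as a sum of min (shared reference form for both ports)
def Ssum (arr : List Int) (v : Int) : Int := (arr.map (fun x => min x v)).sum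

theorem sA_aux (arr : List Int) (v : Int) : ∀ t : Int,
    arr.foldl (fun t x => if x ≤ v then t + x else t + v) t = t + Ssum arr v := by
  induction arr with
  | nil => intro t; simp [Ssum]
  | cons y ys ih =>
      intro t
      simp only [List.foldl_cons, Ssum, List.map_cons, List.sum_cons]
      rw [ih]
      by_cases h : y ≤ v
      · have hm : min y v = y := min_eq_left h
        simp [h, Ssum]; omega
      · have hm : min y v = v := min_eq_right (by omega)
        simp [h, Ssum, hm]; ring

theorem sA_eq_Ssum (arr : List Int) (v : Int) : sA arr v = Ssum arr v := by
  simpa using sA_aux arr v 0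

theorem Ssum_mono (arr : List Int) {v w : Int} (h : v ≤ w) : Ssum arr v ≤ Ssum arr w := by
  induction arr with
  | nil => simp [Ssum]
  | cons y ys ih =>
      simp only [Ssum, List.map_cons, List.sum_cons] at *
      exact add_le_add (min_le_min le_rfl h) ih

theorem Ssum_strict (arr : List Int) {v w x : Int} (hvw : v < w) (hx : x ∈ arr) (hwx : w ≤ x) :
    Ssum arr v < Ssum arr w := by
  induction arr with
  | nil => simp at hx
  | cons y ys ih =>
      simp only [Ssum, List.map_cons, List.sum_cons] at *
      rcases List.mem_cons.mp hx with rfl | hx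
      · have h1 : min x v = v := min_eq_right (by omega)
        have h2 : v < min x w := by omega
        have h3 := Ssum_mono ys (le_of_lt hvw)
        simp only [Ssum] at h3; omega
      · have h1 : min y v ≤ min y w := min_le_min le_rfl (le_of_lt hvw)
        have h2 := ih hx
        omega

-- the boundary value both searches converge to
def CharR (arr : List Int) (t M r : Int) : Prop :=
  1 ≤ r ∧ r ≤ M + 1 ∧ (∀ v, 1 ≤ v → v < r → Ssum arr v < t) ∧ (∀ v, r ≤ v → v ≤ M → t ≤ Ssum arr v)

theorem CharR_unique {arr : List Int} {t M r1 r2 : Int}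
    (h1 : CharR arr t M r1) (h2 : CharR arr t M r2) : r1 = r2 := by
  obtain ⟨a1, b1, c1, d1⟩ := h1
  obtain ⟨a2, b2, c2, d2⟩ := h2
  by_contra hne
  rcases lt_or_gt_of_ne hne with hlt | hlt
  · have := c2 r1 a1 hlt
    have := d1 r1 le_rfl (by omega)
    omega
  · have := c1 r2 a2 hlt
    have := d2 r2 le_rfl (by omega)
    omega

-- A's final comparison as a function of the boundary
def RetR (arr : List Int) (t r : Int) : Int :=
  if |Ssum arr r - t| < |Ssum arr (r - 1) - t| then r
  else if |Ssum arr r - t| > |Ssum arr (r - 1) - t| then r - 1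
  else min r (r - 1)

theorem loopA_spec (arr : List Int) (t M : Int) (hM : M ∈ arr)
    (l h : Int) (h1 : 1 ≤ l) (h2 : l ≤ h + 1) (h3 : h ≤ M)
    (inv1 : ∀ v, 1 ≤ v → v < l → Ssum arr v < t)
    (inv2 : ∀ v, h < v → v ≤ M → t < Ssum arr v) :
    ∃ r, CharR arr t M r ∧ loopA arr t l h = RetR arr t r := by
  rw [loopA]
  by_cases hlh : l ≤ h
  · rw [dif_pos hlh]
    have hmb := PySem.Int.floordiv_two_mid_bounds (lo := l) (hi := h) hlh
    set m := PySem.Int.floordiv (l + h) 2 with hm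
    simp only [sA_eq_Ssum]
    rcases lt_trichotomy (Ssum arr m) t with hc | hc | hc
    · rw [if_pos (by omega)]
      exact loopA_spec arr t M hM (m + 1) h (by omega) (by omega) h3
        (fun v hv1 hv2 => by
          by_cases hvl : v < l
          · exact inv1 v hv1 hvl
          · have := Ssum_mono arr (show v ≤ m by omega)
            omega)
        inv2
    · rw [if_neg (by omega), if_neg (by omega)]
      refine ⟨m, ⟨by omega, by omega, ?_, ?_⟩, ?_⟩
      · intro v hv1 hv2
        by_cases hvl : v < l
        · exact inv1 v hv1 hvl
        · have := Ssum_strict arr (show v < m by omega) hM (show m ≤ M by omega)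
          omega
      · intro v hv1 hv2
        have := Ssum_mono arr (show m ≤ v from hv1)
        omega
      · have hlt : Ssum arr (m - 1) < t := by
          have := Ssum_strict arr (show m - 1 < m by omega) hM (show m ≤ M by omega)
          omega
        rw [RetR, if_pos]
        rw [hc]
        simp only [sub_self, abs_zero]
        exact abs_pos.mpr (by omega)
    · rw [if_neg (by omega), if_pos (by omega)]
      exact loopA_spec arr t M hM l (m - 1) h1 (by omega) (by omega) inv1
        (fun v hv1 hv2 => by
          by_cases hvh : h < v
          · exact inv2 v hvh hv2
          · have := Ssum_mono arr (show m ≤ v by omega)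
            omega)
  · rw [dif_neg hlh]
    have hl : h = l - 1 := by omega
    refine ⟨l, ⟨h1, by omega, inv1, fun v hv1 hv2 => le_of_lt (inv2 v (by omega) hv2)⟩, ?_⟩
    subst hl
    simp only [sA_eq_Ssum, RetR]
termination_by (h + 1 - l).toNat
decreasing_by all_goals omega

theorem loopB_spec (arr a prefixL : List Int) (n t M : Int)
    (hs : ∀ v, svalB a prefixL n v = Ssum arr v)
    (lo hi : Int) (h1 : 1 ≤ lo) (h2 : lo ≤ hi + 1) (h3 : hi ≤ M)
    (inv1 : ∀ v, 1 ≤ v → v < lo → Ssum arr v < t)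
    (inv2 : ∀ v, hi < v → v ≤ M → t ≤ Ssum arr v) :
    ∃ r, CharR arr t M r ∧ loopB a prefixL n t lo hi = r := by
  rw [loopB]
  by_cases hlh : lo ≤ hi
  · rw [dif_pos hlh]
    have hmb := PySem.Int.floordiv_two_mid_bounds (lo := lo) (hi := hi) hlh
    set mid := PySem.Int.floordiv (lo + hi) 2 with hm
    simp only [hs]
    by_cases hc : Ssum arr mid ≥ t
    · rw [if_pos hc]
      exact loopB_spec arr a prefixL n t M hs lo (mid - 1) h1 (by omega) (by omega) inv1
        (fun v hv1 hv2 => by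
          have := Ssum_mono arr (show mid ≤ v by omega)
          omega)
    · rw [if_neg hc]
      exact loopB_spec arr a prefixL n t M hs (mid + 1) hi (by omega) (by omega) h3
        (fun v hv1 hv2 => by
          by_cases hvl : v < lo
          · exact inv1 v hv1 hvl
          · have := Ssum_mono arr (show v ≤ mid by omega)
            omega)
        inv2
  · rw [dif_neg hlh]
    exact ⟨lo, ⟨h1, by omega, inv1, fun v hv1 hv2 => inv2 v (by omega) hv2⟩, rfl⟩
termination_by (hi + 1 - lo).toNat
decreasing_by all_goals omega

theorem bisR_spec (a : List Int) (v : Int)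
    (hmono : ∀ (p q : Nat) (hpq : p ≤ q) (hq : q < a.length), a[p]'(Nat.lt_of_le_of_lt hpq hq) ≤ a[q])
    (lo hi : Int) (h0 : 0 ≤ lo) (h1 : lo ≤ hi) (h2 : hi ≤ (a.length : Int))
    (inv1 : ∀ j : Nat, (j : Int) < lo → (hj : j < a.length) → a[j] ≤ v)
    (inv2 : ∀ j : Nat, hi ≤ (j : Int) → (hj : j < a.length) → v < a[j]) :
    0 ≤ bisR a v lo hi ∧ bisR a v lo hi ≤ (a.length : Int) ∧
    (∀ j : Nat, (j : Int) < bisR a v lo hi → (hj : j < a.length) → a[j] ≤ v) ∧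
    (∀ j : Nat, bisR a v lo hi ≤ (j : Int) → (hj : j < a.length) → v < a[j]) := by
  rw [bisR]
  by_cases hlh : lo < hi
  · rw [dif_pos hlh]
    have hmb := PySem.Int.floordiv_two_mid_bounds (lo := lo) (hi := hi) (le_of_lt hlh)
    have hmlt : PySem.Int.floordiv (lo + hi) 2 < hi := by
      rw [PySem.Int.floordiv_eq_ediv_of_pos (by omega)]; omega
    set mid := PySem.Int.floordiv (lo + hi) 2 with hm
    have hmidlen : mid.toNat < a.length := by omega
    have hget := PySem.List.pyGetD_eq_getElem (xs := a) (i := mid) (d := 0) (by omega) (by omega)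
    simp only [hget]
    by_cases hc : a[mid.toNat] ≤ v
    · rw [if_pos hc]
      exact bisR_spec a v hmono (mid + 1) hi (by omega) (by omega) h2
        (fun j hj1 hj2 => le_trans (hmono j mid.toNat (by omega) hmidlen) hc)
        inv2
    · rw [if_neg hc]
      exact bisR_spec a v hmono lo mid (by omega) (by omega) (by omega) inv1
        (fun j hj1 hj2 => lt_of_lt_of_le (by omega) (hmono mid.toNat j (by omega) hj2))
  · rw [dif_neg hlh]
    exact ⟨h0, by omega, fun j hj1 hj2 => inv1 j (by omega) hj2,
           fun j hj1 hj2 => inv2 j (by omega) hj2⟩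
termination_by (hi - lo).toNat
decreasing_by all_goals omega

theorem fold_prefix (xs : List Int) : ∀ (ys : List Int) (s : Int),
    xs.foldl (fun p x => p ++ [PySem.List.pyGetD p (-1) 0 + x]) (ys ++ [s]) =
      ys ++ List.scanl (· + ·) s xs := by
  induction xs with
  | nil => intro ys s; simp [List.scanl_nil]
  | cons x t ih =>
      intro ys s
      simp only [List.foldl_cons, PySem.List.pyGetD_neg_one_append_singleton, List.scanl_cons]
      have h2 : ys ++ [s] ++ [s + x] = (ys ++ [s]) ++ [s + x] := by simp
      rw [h2, ih (ys ++ [s]) (s + x)]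
      simp

theorem scanl_get (xs : List Int) : ∀ (i : Nat) (s : Int), i ≤ xs.length →
    (List.scanl (· + ·) s xs)[i]? = some (s + (xs.take i).sum) := by
  induction xs with
  | nil =>
      intro i s hi
      have : i = 0 := by simp at hi; omega
      subst this
      simp [List.scanl_nil]
  | cons x t ih =>
      intro i s hi
      cases i with
      | zero => simp [List.scanl_cons]
      | succ k =>
          simp only [List.scanl_cons, List.getElem?_cons_succ]
          rw [ih k (s + x) (by simpa using hi)]
          simp [List.take_succ_cons]
          ring

theorem Ssum_split (a : List Int) (v : Int) (k : Nat) (hk : k ≤ a.length)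
    (h1 : ∀ j : Nat, j < k → (hj : j < a.length) → a[j] ≤ v)
    (h2 : ∀ j : Nat, k ≤ j → (hj : j < a.length) → v < a[j]) :
    Ssum a v = (a.take k).sum + v * ((a.length : Int) - (k : Int)) := by
  have hsplit : Ssum a v = Ssum (a.take k) v + Ssum (a.drop k) v := by
    conv_lhs => rw [← List.take_append_drop k a]
    simp [Ssum]
  have ht : Ssum (a.take k) v = (a.take k).sum := by
    unfold Ssum
    have : ∀ x ∈ a.take k, min x v = x := by
      intro x hx
      obtain ⟨i, hi, rfl⟩ := List.mem_iff_getElem.mp hx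
      rw [List.getElem_take]
      have hik : i < k := by
        have := hi; rw [List.length_take] at this; omega
      exact min_eq_left (h1 i hik (by rw [List.length_take] at hi; omega))
    rw [List.map_congr_left this, List.map_id']
  have hd : Ssum (a.drop k) v = v * ((a.drop k).length : Int) := by
    unfold Ssum
    have : ∀ x ∈ a.drop k, min x v = v := by
      intro x hx
      obtain ⟨i, hi, rfl⟩ := List.mem_iff_getElem.mp hx
      rw [List.getElem_drop]
      have hlen : k + i < a.length := by
        have := hi; rw [List.length_drop] at this; omega
      exact min_eq_right (le_of_lt (h2 (k + i) (by omega) hlen))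
    rw [List.map_congr_left this, PySem.List.sum_map_const_int]
    ring
  rw [hsplit, ht, hd, List.length_drop]
  have : ((a.length - k : Nat) : Int) = (a.length : Int) - (k : Int) := by omega
  rw [this]

theorem sval_correct (arr : List Int) (v : Int) :
    svalB (PySem.List.sorted arr (fun y => y) false)
      ((PySem.List.sorted arr (fun y => y) false).foldl
        (fun p x => p ++ [PySem.List.pyGetD p (-1) 0 + x]) [0])
      ((PySem.List.sorted arr (fun y => y) false).length) v = Ssum arr v := by
  set a := PySem.List.sorted arr (fun y => y) false with ha
  have hmono : ∀ (p q : Nat) (hpq : p ≤ q) (hq : q < a.length),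
      a[p]'(Nat.lt_of_le_of_lt hpq hq) ≤ a[q] := by
    intro p q hpq hq
    exact PySem.List.sorted_id_getElem_mono arr hpq hq
  have hb := bisR_spec a v hmono 0 (a.length : Int) le_rfl (by omega) le_rfl
    (fun j hj1 hj2 => absurd hj1 (by omega))
    (fun j hj1 hj2 => absurd hj1 (by omega))
  obtain ⟨hr0, hrn, hble, hbgt⟩ := hb
  set r := bisR a v 0 (a.length : Int) with hrdef
  have hpre : (a.foldl (fun p x => p ++ [PySem.List.pyGetD p (-1) 0 + x]) [0]) =
      List.scanl (· + ·) 0 a := by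
    have := fold_prefix a [] 0
    simpa using this
  rw [svalB]
  simp only [hpre, ← hrdef]
  have hlenp : (List.scanl (· + ·) (0 : Int) a).length = a.length + 1 := List.length_scanl
  have hget : PySem.List.pyGetD (List.scanl (· + ·) (0 : Int) a) r 0 =
      (List.scanl (· + ·) (0 : Int) a)[r.toNat]'(by omega) := by
    rw [PySem.List.pyGetD_eq_getElem _ _ hr0 (by omega)]
  have hidx := scanl_get a r.toNat 0 (by omega)
  rw [List.getElem?_eq_getElem (by omega)] at hidx
  have hval : (List.scanl (· + ·) (0 : Int) a)[r.toNat]'(by omega) = (a.take r.toNat).sum := by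
    have := Option.some.inj hidx
    rw [this]; ring
  rw [hget, hval]
  have hsplit := Ssum_split a v r.toNat (by omega)
    (fun j hj1 hj2 => hble j (by omega) hj2)
    (fun j hj1 hj2 => hbgt j (by omega) hj2)
  have hperm : Ssum a v = Ssum arr v :=
    List.Perm.sum_eq (List.Perm.map _ (PySem.List.sorted_perm arr (fun y => y) false))
  rw [← hperm, hsplit]
  have : ((r.toNat : Int)) = r := by omega
  rw [this]

-- ===== VERDICT (by name: the statement is the Claim_ definition above) =====
theorem findBestValue_spec : Claim_equal_findBestValue := by
  intro arr target hdom hpre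
  unfold Spec_findBestValue
  unfold Pre_findBestValue at hpre
  obtain ⟨x0, hx0mem, hx0⟩ := by simpa [List.any_eq_true] using hpre
  have hne : arr ≠ [] := by intro h; subst h; simp at hx0mem
  obtain ⟨M, hMeq⟩ : ∃ M, PySem.List.max? arr (fun y => y) = some M := by
    cases hmx : PySem.List.max? arr (fun y => y) with
    | none => exact absurd ((PySem.List.max?_eq_none_iff arr (fun y => y)).mp hmx) hne
    | some M => exact ⟨M, rfl⟩
  have hMmem : M ∈ arr := PySem.List.max?_mem hMeq
  have hMmax : ∀ y ∈ arr, y ≤ M := PySem.List.max?_isMax hMeq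
  have hM0 : 0 ≤ M := le_trans hx0 (hMmax x0 hx0mem)
  -- A's side
  obtain ⟨rA, hcA, heqA⟩ := loopA_spec arr target M hMmem 1 M le_rfl (by omega) le_rfl
    (fun v hv1 hv2 => absurd hv1 (by omega))
    (fun v hv1 hv2 => absurd hv1 (by omega))
  have hA : findBestValue arr target = RetR arr target rA := by
    rw [findBestValue, hMeq]
    exact heqA
  -- B's side
  set a := PySem.List.sorted arr (fun y => y) false with ha
  have hane : a ≠ [] := by
    rw [ha, Ne, PySem.List.sorted_eq_nil_iff]; exact hne
  have halen : 0 < a.length := List.length_pos_iff.mpr hane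
  have hmono2 : ∀ (p q : Nat) (hpq : p ≤ q) (hq : q < a.length),
      a[p]'(Nat.lt_of_le_of_lt hpq hq) ≤ a[q] := by
    intro p q hpq hq
    exact PySem.List.sorted_id_getElem_mono arr hpq hq
  have hlast : PySem.List.pyGetD a (-1) 0 = M := by
    rw [PySem.List.pyGetD_neg_one a 0 hane, List.getLast_eq_getElem]
    have hmemM : M ∈ a := (PySem.List.mem_sorted arr (fun y => y) false M).mpr hMmem
    obtain ⟨i, hilen, hiM⟩ := List.mem_iff_getElem.mp hmemM
    have h1 : M ≤ a[a.length - 1]'(by omega) := by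
      rw [← hiM]
      exact hmono2 i (a.length - 1) (by omega) (by omega)
    have h2 : a[a.length - 1]'(by omega) ≤ M :=
      hMmax _ ((PySem.List.mem_sorted arr (fun y => y) false _).mp (List.getElem_mem _))
    omega
  obtain ⟨rB, hcB, heqB⟩ := loopB_spec arr a
    (a.foldl (fun p x => p ++ [PySem.List.pyGetD p (-1) 0 + x]) [0]) (a.length : Int) target M
    (fun v => sval_correct arr v) 1 M le_rfl (by omega) le_rfl
    (fun v hv1 hv2 => absurd hv1 (by omega))
    (fun v hv1 hv2 => absurd hv1 (by omega))
  have hr : rA = rB := CharR_unique hcA hcB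
  rw [hA, findBestValue_alt]
  simp only [← ha, hlast, heqB]
  rw [hr, RetR]
  simp only [ha]
  simp only [sval_correct]
  by_cases hc1 : |Ssum arr rB - target| < |Ssum arr (rB - 1) - target|
  · rw [if_pos hc1, if_pos hc1]
  · rw [if_neg hc1, if_neg hc1]
    split <;> omega
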